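-- pv_equiv track=rewrite | github.com/trmchale1/WGU-C950 | model.py | sort_for_delivery
-- ===== SOURCE A (Python) =====
-- def sort_for_delivery(nested_dictionary):
--     dropoffs = []
--     notes = []
--     for key in nested_dictionary.keys():
--         for k in nested_dictionary[key].keys():
--             for values in nested_dictionary[key].values():
--                 if values == "9:00 AM":
--                     dropoffs.append([key,values])
--                 elif values == "10:30 AM":
--                     dropoffs.append([key,values])
--     dropoffs = sorted(dropoffs)
--     dropoffs = [dropoffs[i] for i in range(len(dropoffs)) if i == 0 or dropoffs[i] != dropoffs[i-1]]
--     for key in nested_dictionary.keys():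
--         for k in nested_dictionary[key].keys():
--             if k == "notes":
--                 notes.append([key,nested_dictionary[key][k]])
--     dropoffs.extend(notes)
--     return dropoffs
-- ===== SOURCE B (Python) =====
-- def sort_for_delivery(nested_dictionary):
--     # Emit drop-off pairs already ordered: walk the keys in sorted order and,
--     # per key, test each time window (in its sorted order) against the set of
--     # inner values; each key is visited once, so no sort/dedup pass is needed.
--     dropoffs = []
--     for key in sorted(nested_dictionary):
--         present = set(nested_dictionary[key].values())
--         for t in ("10:30 AM", "9:00 AM"):
--             if t in present:
--                 dropoffs.append([key, t])
--     for key, inner in nested_dictionary.items():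
--         if "notes" in inner:
--             dropoffs.append([key, inner["notes"]])
--     return dropoffs
-- ===== Notes on version B (the rewrite author's own statement) =====
-- stated objective: simpler
-- what changed: A collects [key,value] pairs once per inner key (a quadratic inner product), sorts the whole pair list and removes adjacent duplicates with an index comprehension; B iterates the keys in sorted order and emits each key's drop-off pairs directly by testing the two time windows against the set of that key's values, so the output is produced already ordered and deduplicated, followed by one plain pass for the notes.
import Mathlib
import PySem

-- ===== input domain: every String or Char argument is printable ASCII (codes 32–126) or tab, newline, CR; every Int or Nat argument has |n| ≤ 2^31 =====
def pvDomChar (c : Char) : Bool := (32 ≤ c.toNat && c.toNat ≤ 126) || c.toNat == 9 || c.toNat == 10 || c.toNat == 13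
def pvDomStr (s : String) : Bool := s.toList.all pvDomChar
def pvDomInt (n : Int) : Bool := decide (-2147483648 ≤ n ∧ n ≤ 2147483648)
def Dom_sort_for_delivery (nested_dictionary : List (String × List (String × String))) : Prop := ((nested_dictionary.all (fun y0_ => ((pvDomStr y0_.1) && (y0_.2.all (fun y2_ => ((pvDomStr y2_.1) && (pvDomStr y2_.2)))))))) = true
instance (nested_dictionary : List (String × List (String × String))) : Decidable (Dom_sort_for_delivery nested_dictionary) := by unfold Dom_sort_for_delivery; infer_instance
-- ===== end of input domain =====

-- B walks the keys in sorted order and emits each key's drop-off pairs directly (set-membership test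
-- per time window), replacing A's collect-all -> sort -> adjacent-dedup passes; same return value.

-- ===== PORT A =====
def sort_for_delivery (nested_dictionary : List (String × List (String × String))) : List (List String) :=
  let d := PySem.Dict.ofList nested_dictionary
  let dropoffs : List (List String) :=
    d.keys.foldl (fun acc key =>
      let inner := PySem.Dict.ofList (d.getD key [])
      inner.keys.foldl (fun acc _k =>
        inner.values.foldl (fun acc v =>
          if v == "9:00 AM" then acc ++ [[key, v]]
          else if v == "10:30 AM" then acc ++ [[key, v]]
          else acc) acc) acc) []
  let ds := PySem.List.sorted dropoffs (fun x => x) false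
  let ds2 := ((PySem.List.pyRange 0 (ds.length : Int) 1).filter
      (fun i => (i == 0) || (PySem.List.pyGetD ds i [] != PySem.List.pyGetD ds (i - 1) []))).map
      (fun i => PySem.List.pyGetD ds i [])
  let notes : List (List String) :=
    d.keys.foldl (fun acc key =>
      let inner := PySem.Dict.ofList (d.getD key [])
      inner.keys.foldl (fun acc k =>
        if k == "notes" then acc ++ [[key, inner.getD k ""]] else acc) acc) []
  ds2 ++ notes

-- ===== PORT B =====
def sort_for_delivery_alt (nested_dictionary : List (String × List (String × String))) : List (List String) :=
  let d := PySem.Dict.ofList nested_dictionary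
  let dropoffs : List (List String) :=
    (PySem.List.sorted d.keys (fun x => x) false).foldl (fun acc key =>
      let present := PySem.Set.ofList (PySem.Dict.ofList (d.getD key [])).values
      (["10:30 AM", "9:00 AM"] : List String).foldl (fun acc t =>
        if PySem.Set.contains present t then acc ++ [[key, t]] else acc) acc) []
  d.items.foldl (fun acc kv =>
    let inner := PySem.Dict.ofList kv.2
    if inner.contains "notes" then acc ++ [[kv.1, inner.getD "notes" ""]] else acc) dropoffs

-- ===== PRECONDITION & SPEC =====
def Spec_sort_for_delivery (nested_dictionary : List (String × List (String × String))) (out : List (List String)) : Prop := out = sort_for_delivery_alt nested_dictionary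
instance (nested_dictionary : List (String × List (String × String))) (out : List (List String)) : Decidable (Spec_sort_for_delivery nested_dictionary out) := by unfold Spec_sort_for_delivery; infer_instance

-- ===== CLAIM (what is proved, stated in full; the proofs are below) =====
def Claim_equal_sort_for_delivery : Prop := ∀ (nested_dictionary : List (String × List (String × String))), Dom_sort_for_delivery nested_dictionary → Spec_sort_for_delivery nested_dictionary (sort_for_delivery nested_dictionary)

-- ===== LEMMAS AND PROOFS =====

-- adjacent-duplicate removal, structurally (the meaning of A's index comprehension)
def pvDAux (prev : List String) : List (List String) → List (List String)
  | [] => []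
  | y :: ys => if y = prev then pvDAux y ys else y :: pvDAux y ys

def pvDAdj : List (List String) → List (List String)
  | [] => []
  | x :: xs => x :: pvDAux x xs

-- the semantic descriptions both ports are reduced to
def pvD (nd : List (String × List (String × String))) : PySem.Dict String (List (String × String)) :=
  PySem.Dict.ofList nd
def pvInn (nd : List (String × List (String × String))) (key : String) : PySem.Dict String String :=
  PySem.Dict.ofList ((pvD nd).getD key [])
def pvP (nd : List (String × List (String × String))) : List (List String) :=
  (pvD nd).keys.flatMap (fun key =>
    (pvInn nd key).keys.flatMap (fun _ =>
      ((pvInn nd key).values.filter (fun v => v == "9:00 AM" || v == "10:30 AM")).map (fun v => [key, v])))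
def pvQ (nd : List (String × List (String × String))) : List (List String) :=
  (PySem.List.sorted (pvD nd).keys (fun x => x) false).flatMap (fun key =>
    ((["10:30 AM", "9:00 AM"] : List String).filter
        (fun t => PySem.Set.contains (PySem.Set.ofList (pvInn nd key).values) t)).map (fun t => [key, t]))
def pvNotes (nd : List (String × List (String × String))) : List (List String) :=
  ((pvD nd).keys.filter (fun key => (pvInn nd key).contains "notes")).map
    (fun key => [key, (pvInn nd key).getD "notes" ""])

-- the LinearOrder-instance copy of sorting lists of strings (core's List.instLT vs Mathlib's order)
theorem pvLt_bridge (a b : List String) :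
    (@LT.lt _ List.instLT a b) ↔ (@LT.lt _ List.instLinearOrder.toLT a b) := by
  exact List.lt_iff_lex_lt a b

theorem pvSorted_bridge (xs : List (List String)) :
    @PySem.List.sorted (List String) (List String) List.instLT (fun a b => List.decidableLT a b) xs (fun x => x) false
      = @PySem.List.sorted (List String) (List String) List.instLinearOrder.toLT LinearOrder.toDecidableLT xs (fun x => x) false := by
  rw [@PySem.List.sorted_eq_foldl_insertBy _ _ List.instLT _ xs (fun x => x),
      @PySem.List.sorted_eq_foldl_insertBy _ _ List.instLinearOrder.toLT LinearOrder.toDecidableLT xs (fun x => x)]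
  congr 1
  funext acc x
  congr 1
  funext a b
  exact decide_eq_decide.mpr (pvLt_bridge a b)

-- A's index comprehension is adjacent dedup
theorem pvDedupAux_eq (x : List String) (xs : List (List String)) :
    ((List.range xs.length).filter (fun k => decide (xs.getD k [] ≠ (x :: xs).getD k []))).map
        (fun k => xs.getD k []) = pvDAux x xs := by
  induction xs generalizing x with
  | nil => simp [pvDAux]
  | cons y ys ih =>
    rw [List.length_cons, List.range_succ_eq_map, List.filter_cons]
    by_cases h : y = x
    · subst h
      rw [pvDAux, if_pos rfl]
      simp only [List.getD_cons_zero, ne_eq, not_true_eq_false, decide_false, Bool.false_eq_true,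
        if_false, List.filter_map, List.map_map, Function.comp_def, List.getD_cons_succ]
      exact ih y
    · rw [pvDAux, if_neg h]
      simp only [List.getD_cons_zero, ne_eq, h, not_false_eq_true, decide_true, if_true,
        List.filter_map, List.map_map, Function.comp_def, List.getD_cons_succ, List.map_cons]
      rw [ih y]

theorem pvDedupIdx_eq (ds : List (List String)) :
    ((PySem.List.pyRange 0 (ds.length : Int) 1).filter
        (fun i => (i == 0) || (PySem.List.pyGetD ds i [] != PySem.List.pyGetD ds (i - 1) []))).map
      (fun i => PySem.List.pyGetD ds i []) = pvDAdj ds := by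
  cases ds with
  | nil => simp [PySem.List.pyRange_zero_natCast 0, pvDAdj]
  | cons x xs =>
    rw [show ((x :: xs).length : Int) = ((xs.length + 1 : Nat) : Int) from by simp,
        PySem.List.pyRange_zero_natCast, List.range_succ_eq_map]
    simp only [List.map_cons, List.filter_cons, List.filter_map, List.map_map, Function.comp_def]
    rw [pvDAdj]
    simp only [Nat.cast_zero, beq_self_eq_true, Bool.true_or, if_true]
    have hmem : ∀ k ∈ List.range xs.length,
        ((((k + 1 : Nat) : Int) == 0) ||
          (PySem.List.pyGetD (x :: xs) ((k + 1 : Nat) : Int) [] !=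
            PySem.List.pyGetD (x :: xs) (((k + 1 : Nat) : Int) - 1) []))
        = decide (xs.getD k [] ≠ (x :: xs).getD k []) := by
      intro k _
      have h2 : (((k + 1 : Nat) : Int) - 1) = ((k : Nat) : Int) := by push_cast; ring
      rw [h2, PySem.List.pyGetD_natCast, PySem.List.pyGetD_natCast, List.getD_cons_succ]
      have h4 : (((k + 1 : Nat) : Int) == 0) = false := by
        simp [beq_iff_eq]; omega
      rw [h4, Bool.false_or, bne]
      simp [decide_not, Bool.beq_eq_decide_eq]
    rw [List.filter_congr hmem]
    simp only [List.map_cons, List.map_map, Function.comp_def, Nat.succ_eq_add_one]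
    have hval : ∀ k ∈ (List.range xs.length).filter
        (fun k => decide (xs.getD k [] ≠ (x :: xs).getD k [])),
        PySem.List.pyGetD (x :: xs) ((k + 1 : Nat) : Int) [] = xs.getD k [] := by
      intro k _
      rw [PySem.List.pyGetD_natCast, List.getD_cons_succ]
    rw [List.map_congr_left hval, pvDedupAux_eq]
    congr 1
    exact PySem.List.pyGetD_zero_cons x xs []

-- adjacent dedup of a weakly sorted list: strictly sorted, same members
theorem pvDAux_spec (prev : List String) (xs : List (List String))
    (hs : xs.Pairwise (fun x y => @LE.le _ List.instLinearOrder.toLE x y))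
    (hlb : ∀ z ∈ xs, @LE.le _ List.instLinearOrder.toLE prev z) :
    (pvDAux prev xs).Pairwise (fun x y => @LT.lt _ List.instLinearOrder.toLT x y)
      ∧ (∀ a, a ∈ pvDAux prev xs ↔ (a ∈ xs ∧ a ≠ prev)) := by
  induction xs generalizing prev with
  | nil => simp [pvDAux]
  | cons y ys ih =>
    rw [List.pairwise_cons] at hs
    obtain ⟨hy, hys⟩ := hs
    by_cases h : y = prev
    · subst h
      rw [pvDAux, if_pos rfl]
      obtain ⟨ih1, ih2⟩ := ih y hys hy
      refine ⟨ih1, fun a => ?_⟩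
      rw [ih2 a, List.mem_cons]
      constructor
      · rintro ⟨ha, hne⟩; exact ⟨Or.inr ha, hne⟩
      · rintro ⟨(rfl | ha), hne⟩
        · exact absurd rfl hne
        · exact ⟨ha, hne⟩
    · rw [pvDAux, if_neg h]
      obtain ⟨ih1, ih2⟩ := ih y hys hy
      have hlby : prev ≤ y := hlb y (List.mem_cons_self)
      constructor
      · rw [List.pairwise_cons]
        refine ⟨fun z hz => ?_, ih1⟩
        obtain ⟨hzys, hzy⟩ := (ih2 z).mp hz
        exact lt_of_le_of_ne (hy z hzys) (Ne.symm hzy)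
      · intro a
        rw [List.mem_cons, ih2 a, List.mem_cons]
        constructor
        · rintro (rfl | ⟨ha, hne⟩)
          · exact ⟨Or.inl rfl, h⟩
          · refine ⟨Or.inr ha, fun hap => ?_⟩
            subst hap
            exact h (le_antisymm (hy a ha) hlby)
        · rintro ⟨(rfl | ha), hne⟩
          · exact Or.inl rfl
          · by_cases hay : a = y
            · exact Or.inl hay
            · exact Or.inr ⟨ha, hay⟩

theorem pvDAdj_spec (xs : List (List String))
    (hs : xs.Pairwise (fun x y => @LE.le _ List.instLinearOrder.toLE x y)) :
    (pvDAdj xs).Pairwise (fun x y => @LT.lt _ List.instLinearOrder.toLT x y)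
      ∧ (∀ a, a ∈ pvDAdj xs ↔ a ∈ xs) := by
  cases xs with
  | nil => simp [pvDAdj]
  | cons x t =>
    rw [List.pairwise_cons] at hs
    obtain ⟨hx, ht⟩ := hs
    obtain ⟨h1, h2⟩ := pvDAux_spec x t ht hx
    rw [pvDAdj]
    constructor
    · rw [List.pairwise_cons]
      refine ⟨fun z hz => ?_, h1⟩
      obtain ⟨hzt, hzx⟩ := (h2 z).mp hz
      exact lt_of_le_of_ne (hx z hzt) (Ne.symm hzx)
    · intro a
      rw [List.mem_cons, h2 a, List.mem_cons]
      constructor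
      · rintro (rfl | ⟨ha, _⟩)
        · exact Or.inl rfl
        · exact Or.inr ha
      · rintro (rfl | ha)
        · exact Or.inl rfl
        · by_cases hax : a = x
          · exact Or.inl hax
          · exact Or.inr ⟨ha, hax⟩

-- two strictly sorted lists with the same members coincide
theorem pvStrictEq {b : Type} [LinearOrder b] :
    ∀ (l1 l2 : List b), l1.Pairwise (· < ·) → l2.Pairwise (· < ·) →
      (∀ a, a ∈ l1 ↔ a ∈ l2) → l1 = l2 := by
  intro l1
  induction l1 with
  | nil =>
    intro l2 _ _ hmem
    cases l2 with
    | nil => rfl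
    | cons y ys => exact absurd ((hmem y).mpr List.mem_cons_self) (List.not_mem_nil)
  | cons x xs ih =>
    intro l2 h1 h2 hmem
    cases l2 with
    | nil => exact absurd ((hmem x).mp List.mem_cons_self) (List.not_mem_nil)
    | cons y ys =>
      rw [List.pairwise_cons] at h1 h2
      have hxy : x = y := by
        rcases List.mem_cons.mp ((hmem x).mp List.mem_cons_self) with h | h
        · exact h
        · rcases List.mem_cons.mp ((hmem y).mpr List.mem_cons_self) with h' | h'
          · exact h'.symm
          · exact absurd (h2.1 x h) (asymm (h1.1 y h'))
      subst hxy
      have htl : ∀ a, a ∈ xs ↔ a ∈ ys := by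
        intro a
        constructor
        · intro ha
          rcases List.mem_cons.mp ((hmem a).mp (List.mem_cons_of_mem _ ha)) with h | h
          · exact absurd (h ▸ h1.1 a ha) (lt_irrefl _)
          · exact h
        · intro ha
          rcases List.mem_cons.mp ((hmem a).mpr (List.mem_cons_of_mem _ ha)) with h | h
          · exact absurd (h ▸ h2.1 a ha) (lt_irrefl _)
          · exact h
      rw [ih ys h1.2 h2.2 htl]

theorem pvFlatMap_if_singleton {c d : Type} (K : List c) (p : c → Bool) (g : c → d) :
    K.flatMap (fun k => if p k then [g k] else []) = (K.filter p).map g := by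
  induction K with
  | nil => simp
  | cons k t ih =>
    rw [List.flatMap_cons, List.filter_cons, ih]
    by_cases h : p k <;> simp [h]

theorem pvFilter_beq_nodup {c : Type} [DecidableEq c] [BEq c] [LawfulBEq c] (l : List c) (x : c)
    (h : l.Nodup) : l.filter (fun k => k == x) = if x ∈ l then [x] else [] := by
  induction l with
  | nil => simp
  | cons y t ih =>
    rw [List.nodup_cons] at h
    rw [List.filter_cons]
    by_cases hyx : y = x
    · subst hyx
      simp only [beq_self_eq_true, if_pos, List.mem_cons, true_or, if_true]
      have : t.filter (fun k => k == y) = [] := by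
        rw [List.filter_eq_nil_iff]
        intro a ha
        simp only [beq_iff_eq]
        intro hay
        exact h.1 (hay ▸ ha)
      rw [this]
    · have : (y == x) = false := by simpa using hyx
      rw [this, if_neg Bool.false_ne_true, ih h.2]
      have hmc : (x ∈ y :: t) ↔ x ∈ t := by
        rw [List.mem_cons]
        exact ⟨fun h' => h'.resolve_left (fun e => hyx e.symm), Or.inr⟩
      simp only [hmc]

-- membership in the two drop-off descriptions agrees
theorem pvMemPQ (nd : List (String × List (String × String))) (a : List String) :
    a ∈ pvP nd ↔ a ∈ pvQ nd := by
  unfold pvP pvQ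
  simp only [List.mem_flatMap, List.mem_map, List.mem_filter, PySem.List.mem_sorted]
  constructor
  · rintro ⟨key, hkey, _k, hk, v, ⟨hv, hvt⟩, rfl⟩
    refine ⟨key, hkey, v, ⟨?_, ?_⟩, rfl⟩
    · rcases Bool.or_eq_true_iff.mp hvt with h | h
      · rw [beq_iff_eq] at h; simp [h]
      · rw [beq_iff_eq] at h; simp [h]
    · rw [PySem.Set.contains_iff, PySem.Set.mem_ofList]
      exact hv
  · rintro ⟨key, hkey, t, ⟨ht2, hc⟩, rfl⟩
    rw [PySem.Set.contains_iff, PySem.Set.mem_ofList] at hc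
    have hkne : (pvInn nd key).keys ≠ [] := by
      intro hnil
      have : (pvInn nd key).values = [] := by
        have h1 : (pvInn nd key).items = [] := by
          have := congrArg List.length hnil
          simpa [PySem.Dict.keys] using this
        simp [PySem.Dict.values, h1]
      rw [this] at hc
      exact List.not_mem_nil hc
    obtain ⟨k0, hk0⟩ := List.exists_mem_of_ne_nil _ hkne
    refine ⟨key, hkey, k0, hk0, t, ⟨hc, ?_⟩, rfl⟩
    rcases List.mem_cons.mp ht2 with h | h
    · simp [h]
    · rcases List.mem_cons.mp h with h' | h'
      · simp [h']
      · exact absurd h' (List.not_mem_nil)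

-- B's drop-off list is strictly sorted
theorem pvQ_pairwise (nd : List (String × List (String × String))) :
    (pvQ nd).Pairwise (fun x y => @LT.lt _ List.instLinearOrder.toLT x y) := by
  unfold pvQ
  rw [List.flatMap_def, List.pairwise_flatten]
  have hkeys : (PySem.List.sorted (pvD nd).keys (fun x => x) false).Pairwise (· < ·) := by
    have h1 := PySem.List.sorted_pairwise (pvD nd).keys (fun x => x)
    have h2 : (PySem.List.sorted (pvD nd).keys (fun x => x) false).Nodup :=
      (PySem.List.sorted_perm (pvD nd).keys (fun x => x) false).symm.nodup
        (PySem.Dict.nodup_keys_ofList nd)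
    exact (h1.and h2).imp (fun h => lt_of_le_of_ne h.1 h.2)
  constructor
  · intro l hl
    rw [List.mem_map] at hl
    obtain ⟨key, _, rfl⟩ := hl
    have hsub : ((["10:30 AM", "9:00 AM"] : List String).filter
        (fun t => PySem.Set.contains (PySem.Set.ofList (pvInn nd key).values) t)).Sublist
        (["10:30 AM", "9:00 AM"] : List String) := List.filter_sublist
    refine List.Pairwise.map (R := fun (t1 t2 : String) => @LT.lt _ List.instLinearOrder.toLT [key, t1] [key, t2]) _ (fun t1 t2 h => h) (List.Pairwise.sublist hsub ?_)
    rw [List.pairwise_cons]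
    refine ⟨?_, by simp⟩
    intro t' ht'
    rcases List.mem_cons.mp ht' with rfl | h'
    · exact List.Lex.cons (List.Lex.rel (by rw [String.lt_iff_toList_lt]; decide))
    · exact absurd h' (List.not_mem_nil)
  · rw [List.pairwise_map]
    refine hkeys.imp_of_mem (fun {k1 k2} h1 h2 hlt => ?_)
    intro x hx y hy
    rw [List.mem_map] at hx hy
    obtain ⟨t1, _, rfl⟩ := hx
    obtain ⟨t2, _, rfl⟩ := hy
    exact List.Lex.rel hlt

-- the two note passes agree
theorem pvNotesA (nd : List (String × List (String × String))) :
    ((PySem.Dict.ofList nd).keys.foldl (fun acc key =>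
      (PySem.Dict.ofList ((PySem.Dict.ofList nd).getD key [])).keys.foldl (fun acc k =>
        if k == "notes" then
          acc ++ [[key, (PySem.Dict.ofList ((PySem.Dict.ofList nd).getD key [])).getD k ""]]
        else acc) acc) [])
    = pvNotes nd := by
  have hstep : ∀ (acc : List (List String)) (key : String), key ∈ (PySem.Dict.ofList nd).keys →
      ((PySem.Dict.ofList ((PySem.Dict.ofList nd).getD key [])).keys.foldl (fun acc k =>
        if k == "notes" then
          acc ++ [[key, (PySem.Dict.ofList ((PySem.Dict.ofList nd).getD key [])).getD k ""]]
        else acc) acc)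
      = acc ++ (if (pvInn nd key).contains "notes"
          then [[key, (pvInn nd key).getD "notes" ""]] else []) := by
    intro acc key _
    rw [PySem.List.foldl_append_if (fun k => k == "notes")
      (fun k => [key, (PySem.Dict.ofList ((PySem.Dict.ofList nd).getD key [])).getD k ""])]
    congr 1
    rw [pvFilter_beq_nodup _ _ (PySem.Dict.nodup_keys_ofList _)]
    simp only [pvInn, pvD]
    by_cases hc : "notes" ∈ (PySem.Dict.ofList ((PySem.Dict.ofList nd).getD key [])).keys
    · rw [if_pos hc, if_pos ((PySem.Dict.contains_iff_mem_keys _ _).mpr hc)]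
      simp
    · rw [if_neg hc, if_neg (fun h => hc ((PySem.Dict.contains_iff_mem_keys _ _).mp h))]
      simp
  refine (PySem.List.foldl_congr_mem _ _ _ _ hstep).trans ?_
  rw [PySem.List.foldl_append_eq_flatMap
        (fun key => (if (pvInn nd key).contains "notes"
          then [[key, (pvInn nd key).getD "notes" ""]] else [])),
      pvFlatMap_if_singleton _ (fun key => (pvInn nd key).contains "notes")
        (fun key => [key, (pvInn nd key).getD "notes" ""]),
      List.nil_append]
  rfl

theorem pvNotesB (nd : List (String × List (String × String))) (acc : List (List String)) :
    ((PySem.Dict.ofList nd).items.foldl (fun acc kv =>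
      if (PySem.Dict.ofList kv.2).contains "notes" then
        acc ++ [[kv.1, (PySem.Dict.ofList kv.2).getD "notes" ""]]
      else acc) acc)
    = acc ++ pvNotes nd := by
  refine (PySem.List.foldl_append_if
      (fun (kv : String × List (String × String)) => (PySem.Dict.ofList kv.2).contains "notes")
      (fun (kv : String × List (String × String)) =>
        [kv.1, (PySem.Dict.ofList kv.2).getD "notes" ""]) _ _).trans ?_
  rw [PySem.Dict.items_eq_map_keys (PySem.Dict.ofList nd) (PySem.Dict.nodup_keys_ofList nd) [],
      List.filter_map, List.map_map]
  rfl

-- A's collected (pre-sort) drop-off list is pvP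
theorem pvDropA (nd : List (String × List (String × String))) :
    ((PySem.Dict.ofList nd).keys.foldl (fun acc key =>
      (PySem.Dict.ofList ((PySem.Dict.ofList nd).getD key [])).keys.foldl (fun acc _k =>
        (PySem.Dict.ofList ((PySem.Dict.ofList nd).getD key [])).values.foldl (fun acc v =>
          if v == "9:00 AM" then acc ++ [[key, v]]
          else if v == "10:30 AM" then acc ++ [[key, v]]
          else acc) acc) acc) [])
    = pvP nd := by
  have hstep : ∀ (acc : List (List String)) (key : String), key ∈ (PySem.Dict.ofList nd).keys →
      ((PySem.Dict.ofList ((PySem.Dict.ofList nd).getD key [])).keys.foldl (fun acc _k =>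
        (PySem.Dict.ofList ((PySem.Dict.ofList nd).getD key [])).values.foldl (fun acc v =>
          if v == "9:00 AM" then acc ++ [[key, v]]
          else if v == "10:30 AM" then acc ++ [[key, v]]
          else acc) acc) acc)
      = acc ++ ((pvInn nd key).keys.flatMap (fun _ =>
          ((pvInn nd key).values.filter (fun v => v == "9:00 AM" || v == "10:30 AM")).map
            (fun v => [key, v]))) := by
    intro acc key _
    have hin : ∀ (acc2 : List (List String)) (k : String),
        k ∈ (PySem.Dict.ofList ((PySem.Dict.ofList nd).getD key [])).keys →
        ((PySem.Dict.ofList ((PySem.Dict.ofList nd).getD key [])).values.foldl (fun acc v =>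
          if v == "9:00 AM" then acc ++ [[key, v]]
          else if v == "10:30 AM" then acc ++ [[key, v]]
          else acc) acc2)
        = acc2 ++ ((pvInn nd key).values.filter
            (fun v => v == "9:00 AM" || v == "10:30 AM")).map (fun v => [key, v]) := by
      intro acc2 _ _
      have hfn : (fun (acc : List (List String)) (v : String) =>
          if v == "9:00 AM" then acc ++ [[key, v]]
          else if v == "10:30 AM" then acc ++ [[key, v]]
          else acc)
        = (fun acc v => if (v == "9:00 AM" || v == "10:30 AM") then acc ++ [[key, v]] else acc) := by
        funext acc v
        by_cases h1 : v == "9:00 AM" <;> by_cases h2 : v == "10:30 AM" <;> simp [h1, h2]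
      rw [hfn, PySem.List.foldl_append_if (fun v => v == "9:00 AM" || v == "10:30 AM")
        (fun v => [key, v])]
      rfl
    refine (PySem.List.foldl_congr_mem _ _ _ _ hin).trans ?_
    rw [PySem.List.foldl_append_eq_flatMap (fun _ =>
          ((pvInn nd key).values.filter (fun v => v == "9:00 AM" || v == "10:30 AM")).map
            (fun v => [key, v]))]
    rfl
  refine (PySem.List.foldl_congr_mem _ _ _ _ hstep).trans ?_
  rw [PySem.List.foldl_append_eq_flatMap (fun key => ((pvInn nd key).keys.flatMap (fun _ =>
        ((pvInn nd key).values.filter (fun v => v == "9:00 AM" || v == "10:30 AM")).map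
          (fun v => [key, v])))), List.nil_append]
  rfl

-- B's drop-off loop is pvQ
theorem pvDropB (nd : List (String × List (String × String))) :
    ((PySem.List.sorted (PySem.Dict.ofList nd).keys (fun x => x) false).foldl (fun acc key =>
      (["10:30 AM", "9:00 AM"] : List String).foldl (fun acc t =>
        if PySem.Set.contains
            (PySem.Set.ofList (PySem.Dict.ofList ((PySem.Dict.ofList nd).getD key [])).values) t
        then acc ++ [[key, t]] else acc) acc) [])
    = pvQ nd := by
  have hstep : ∀ (acc : List (List String)) (key : String),
      key ∈ PySem.List.sorted (PySem.Dict.ofList nd).keys (fun x => x) false →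
      ((["10:30 AM", "9:00 AM"] : List String).foldl (fun acc t =>
        if PySem.Set.contains
            (PySem.Set.ofList (PySem.Dict.ofList ((PySem.Dict.ofList nd).getD key [])).values) t
        then acc ++ [[key, t]] else acc) acc)
      = acc ++ ((["10:30 AM", "9:00 AM"] : List String).filter
          (fun t => PySem.Set.contains (PySem.Set.ofList (pvInn nd key).values) t)).map
            (fun t => [key, t]) := by
    intro acc key _
    rw [PySem.List.foldl_append_if (fun t => PySem.Set.contains
        (PySem.Set.ofList (PySem.Dict.ofList ((PySem.Dict.ofList nd).getD key [])).values) t)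
      (fun t => [key, t])]
    rfl
  refine (PySem.List.foldl_congr_mem _ _ _ _ hstep).trans ?_
  rw [PySem.List.foldl_append_eq_flatMap (fun key =>
        ((["10:30 AM", "9:00 AM"] : List String).filter
          (fun t => PySem.Set.contains (PySem.Set.ofList (pvInn nd key).values) t)).map
            (fun t => [key, t])), List.nil_append]
  rfl

-- dedup of the sorted collected list is exactly B's list
theorem pvMain (nd : List (String × List (String × String))) :
    pvDAdj (@PySem.List.sorted (List String) (List String) List.instLinearOrder.toLT
        LinearOrder.toDecidableLT (pvP nd) (fun x => x) false) = pvQ nd := by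
  have hle := @PySem.List.sorted_pairwise (List String) (List String) List.instLinearOrder (pvP nd) (fun x => x)
  obtain ⟨hpw, hmem⟩ := pvDAdj_spec _ hle
  refine pvStrictEq _ _ hpw (pvQ_pairwise nd) (fun a => ?_)
  rw [hmem a, @PySem.List.mem_sorted (List String) (List String) List.instLinearOrder.toLT LinearOrder.toDecidableLT (pvP nd) (fun x => x) false a]
  exact pvMemPQ nd a

-- ===== VERDICT (by name: the statement is the Claim_ definition above) =====
theorem sort_for_delivery_spec : Claim_equal_sort_for_delivery := by
  intro nd _
  show sort_for_delivery nd = sort_for_delivery_alt nd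
  unfold sort_for_delivery sort_for_delivery_alt
  simp only [pvDropA, pvNotesA, pvDropB, pvNotesB]
  rw [pvSorted_bridge (pvP nd), pvDedupIdx_eq, pvMain nd]
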